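-- pv_equiv track=rewrite | github.com/Gillingham-Lab/DECL-Gen | DECLGen/cli/commands/library.py | yield_helper
-- ===== SOURCE A (Python) =====
-- def yield_helper(cat1, cats):
--     a = 1
--     ids = []
--     sizes = []
--     for cat in cats:
--         a *= cat[0]
--         ids.append(cat[1])
--         sizes.append(cat[0])
--
--     result = {cat1[0]: cat1[1]}
--     for i in range(a):
--         parts = {}
--         for j in range(len(sizes)):
--             size = sizes[j]
--             id = ids[j]
--             k = i % size
--             i = i // size
--             parts = {**parts, **{id: k}}
--         elements = {**result, **parts}
--         yield elements
-- ===== SOURCE B (Python) =====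
-- def yield_helper(cat1, cats):
--     ids = [cat[1] for cat in cats]
--     result = {cat1[0]: cat1[1]}
--     if any(cat[0] <= 0 for cat in cats):
--         return  # some index range is empty: no combinations at all
--     # cartesian product of index ranges, first category varying fastest:
--     # build the digit lists back-to-front, prepending each category's range
--     digit_lists = [[]]
--     for size, _ in reversed(cats):
--         digit_lists = [[d] + rest for rest in digit_lists for d in range(size)]
--     for ds in digit_lists:
--         yield {**result, **dict(zip(ids, ds))}
-- ===== Notes on version B (the rewrite author's own statement) =====
-- stated objective: alternative
-- what changed: Replaces A's range(product)+repeated-divmod odometer (which rebuilds each parts dict key by key with index arithmetic) by directly constructing the cartesian product of the index ranges back-to-front (first category varying fastest) and zipping each digit list with the ids.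
-- intended difference: On inputs where some category size is negative but the product of all sizes is positive, A yields product-many dicts containing nonpositive garbage indices produced by floor divmod on a negative radix, while B yields nothing; a category with a negative size has no valid member indices, so the empty enumeration is intended. — e.g. on yield_helper(("x", 0), [(-1, "a"), (-1, "b")]): A returns [[("x", 0), ("a", 0), ("b", 0)]], B returns []
import Mathlib
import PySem

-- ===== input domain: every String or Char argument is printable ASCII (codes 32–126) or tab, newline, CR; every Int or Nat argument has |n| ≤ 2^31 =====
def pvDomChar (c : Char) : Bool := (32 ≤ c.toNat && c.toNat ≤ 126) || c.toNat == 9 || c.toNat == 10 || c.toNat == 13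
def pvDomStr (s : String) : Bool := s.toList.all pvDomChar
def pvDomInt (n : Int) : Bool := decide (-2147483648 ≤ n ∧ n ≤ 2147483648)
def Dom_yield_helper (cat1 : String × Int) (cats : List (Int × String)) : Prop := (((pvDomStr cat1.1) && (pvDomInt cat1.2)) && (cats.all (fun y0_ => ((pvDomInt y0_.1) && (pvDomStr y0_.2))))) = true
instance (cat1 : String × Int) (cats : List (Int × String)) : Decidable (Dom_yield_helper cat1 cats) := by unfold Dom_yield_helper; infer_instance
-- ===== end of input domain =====

-- B builds the cartesian product of index ranges directly (back-to-front, first category fastest)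
-- instead of A's range(prod)+divmod odometer; both are generators — the equivalence is about the
-- yielded sequence of dicts.

-- ===== PORT A =====
def yield_helper (cat1 : String × Int) (cats : List (Int × String)) : List (List (String × Int)) :=
  -- a = 1; ids = []; sizes = []; for cat in cats: a *= cat[0]; ids.append(cat[1]); sizes.append(cat[0])
  let st := cats.foldl
    (fun (st : Int × List String × List Int) cat =>
      (st.1 * cat.1, st.2.1 ++ [cat.2], st.2.2 ++ [cat.1])) (1, [], [])
  let a := st.1
  let ids := st.2.1
  let sizes := st.2.2
  let result : PySem.Dict String Int := PySem.Dict.ofList [(cat1.1, cat1.2)]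
  -- for i in range(a): parts = {}; for j in range(len(sizes)): … ; yield {**result, **parts}
  (PySem.List.pyRange 0 a 1).map (fun i =>
    let pj := (PySem.List.pyRange 0 (sizes.length : Int) 1).foldl
      (fun (st : PySem.Dict String Int × Int) j =>
        -- size = sizes[j]; id = ids[j]  (j always in range, so pyGetD is exact here)
        let size := PySem.List.pyGetD sizes j 0
        let id := PySem.List.pyGetD ids j ""
        let k := PySem.Int.mod st.2 size
        (st.1.update [(id, k)], PySem.Int.floordiv st.2 size))
      (PySem.Dict.empty, i)
    (result.update pj.1.items).items)

-- ===== PORT B =====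
def yield_helper_alt (cat1 : String × Int) (cats : List (Int × String)) : List (List (String × Int)) :=
  -- ids = [cat[1] for cat in cats]; result = {cat1[0]: cat1[1]}
  let ids := cats.map (fun cat => cat.2)
  let result : PySem.Dict String Int := PySem.Dict.ofList [(cat1.1, cat1.2)]
  -- if any(cat[0] <= 0 for cat in cats): return  (some index range is empty: no combinations)
  if cats.any (fun cat => cat.1 ≤ 0) then []
  else
  -- digit_lists = [[]]; for size, _ in reversed(cats): digit_lists = [[d]+rest for rest in digit_lists for d in range(size)]
  let digitLists := cats.reverse.foldl
    (fun (acc : List (List Int)) (c : Int × String) =>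
      acc.flatMap (fun rest => (PySem.List.pyRange 0 c.1 1).map (fun d => d :: rest)))
    [[]]
  -- for ds in digit_lists: yield {**result, **dict(zip(ids, ds))}
  digitLists.map (fun ds => (result.update (PySem.Dict.ofList (ids.zip ds)).items).items)

-- ===== PRECONDITION & SPEC =====
-- On inputs where some category size is negative while the product of all sizes is positive, A yields
-- product-many dicts holding nonpositive garbage indices produced by floor divmod on a negative radix,
-- while B yields nothing; a category with a negative size has no valid member indices, so the empty
-- enumeration is the intended behaviour.
def D_yield_helper (cat1 : String × Int) (cats : List (Int × String)) : Prop :=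
  (∃ c ∈ cats, c.1 < 0) ∧ 0 < (cats.map Prod.fst).prod
instance (cat1 : String × Int) (cats : List (Int × String)) : Decidable (D_yield_helper cat1 cats) := by unfold D_yield_helper; infer_instance

def Spec_yield_helper (cat1 : String × Int) (cats : List (Int × String)) (out : List (List (String × Int))) : Prop := ¬ D_yield_helper cat1 cats → out = yield_helper_alt cat1 cats
instance (cat1 : String × Int) (cats : List (Int × String)) (out : List (List (String × Int))) : Decidable (Spec_yield_helper cat1 cats out) := by unfold Spec_yield_helper; infer_instance

def pvDiffWitness_yield_helper : (String × Int) × (List (Int × String)) := (("x", 0), [(-1, "a"), (-1, "b")])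
def pvDiffWitnessOut_yield_helper : (List (List (String × Int))) × (List (List (String × Int))) :=
  ([[("x", 0), ("a", 0), ("b", 0)]], [])

-- ===== CLAIM (what is proved, stated in full; the proofs are below) =====
def Claim_unchanged_yield_helper : Prop := ∀ (cat1 : String × Int) (cats : List (Int × String)), Dom_yield_helper cat1 cats → Spec_yield_helper cat1 cats (yield_helper cat1 cats)
def Claim_changed_yield_helper : Prop := Dom_yield_helper (pvDiffWitness_yield_helper.1) (pvDiffWitness_yield_helper.2) ∧ D_yield_helper (pvDiffWitness_yield_helper.1) (pvDiffWitness_yield_helper.2) ∧ yield_helper (pvDiffWitness_yield_helper.1) (pvDiffWitness_yield_helper.2) = pvDiffWitnessOut_yield_helper.1 ∧ yield_helper_alt (pvDiffWitness_yield_helper.1) (pvDiffWitness_yield_helper.2) = pvDiffWitnessOut_yield_helper.2 ∧ pvDiffWitnessOut_yield_helper.1 ≠ pvDiffWitnessOut_yield_helper.2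
def Claim_exact_yield_helper : Prop := ∀ (cat1 : String × Int) (cats : List (Int × String)), Dom_yield_helper cat1 cats → D_yield_helper cat1 cats → yield_helper cat1 cats ≠ yield_helper_alt cat1 cats

-- ===== LEMMAS AND PROOFS =====

-- the value digits of i in the mixed radix given by the sizes, first category least significant
def pvDv : List (Int × String) → Int → List Int
  | [], _ => []
  | c :: cs, i => PySem.Int.mod i c.1 :: pvDv cs (PySem.Int.floordiv i c.1)

-- the (id, digit) pairs A's inner loop inserts, in insertion order
def pvDg : List (Int × String) → Int → List (String × Int)
  | [], _ => []
  | c :: cs, i => (c.2, PySem.Int.mod i c.1) :: pvDg cs (PySem.Int.floordiv i c.1)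

-- the final value of the shadowed loop variable i
def pvFin : List (Int × String) → Int → Int
  | [], i => i
  | c :: cs, i => pvFin cs (PySem.Int.floordiv i c.1)

-- B's digit lists: cartesian product of the index ranges, first category fastest
def pvD : List (Int × String) → List (List Int)
  | [] => [[]]
  | c :: cs => (pvD cs).flatMap (fun rest => (PySem.List.pyRange 0 c.1 1).map (fun d => d :: rest))

lemma pvL0 (cats : List (Int × String)) : ∀ (a0 : Int) (ids0 : List String) (sizes0 : List Int),
    cats.foldl (fun (st : Int × List String × List Int) cat =>
        (st.1 * cat.1, st.2.1 ++ [cat.2], st.2.2 ++ [cat.1])) (a0, ids0, sizes0)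
      = (a0 * (cats.map Prod.fst).prod, ids0 ++ cats.map Prod.snd, sizes0 ++ cats.map Prod.fst) := by
  induction cats with
  | nil => intro a0 ids0 sizes0; simp
  | cons c cs ih => intro a0 ids0 sizes0; simp [ih, mul_assoc]

lemma pvZip (cs : List (Int × String)) : ∀ i, pvDg cs i = (cs.map Prod.snd).zip (pvDv cs i) := by
  induction cs with
  | nil => intro i; rfl
  | cons c cs ih => intro i; simp [pvDg, pvDv, ih]

lemma pvZipFold (cs : List (Int × String)) : ∀ (d : PySem.Dict String Int) (i : Int),
    cs.foldl (fun (st : PySem.Dict String Int × Int) (p : Int × String) =>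
        (st.1.update [(p.2, PySem.Int.mod st.2 p.1)], PySem.Int.floordiv st.2 p.1)) (d, i)
      = (d.update (pvDg cs i), pvFin cs i) := by
  induction cs with
  | nil => intro d i; rfl
  | cons c cs ih =>
    intro d i
    have step : List.foldl (fun (st : PySem.Dict String Int × Int) (p : Int × String) =>
          (st.1.update [(p.2, PySem.Int.mod st.2 p.1)], PySem.Int.floordiv st.2 p.1)) (d, i) (c :: cs)
        = List.foldl (fun (st : PySem.Dict String Int × Int) (p : Int × String) =>
          (st.1.update [(p.2, PySem.Int.mod st.2 p.1)], PySem.Int.floordiv st.2 p.1))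
          (d.update [(c.2, PySem.Int.mod i c.1)], PySem.Int.floordiv i c.1) cs := rfl
    rw [step, ih]
    rfl

lemma pvInner (cats : List (Int × String)) (d0 : PySem.Dict String Int) (i : Int) :
    (PySem.List.pyRange 0 (((cats.map Prod.fst).length : Nat) : Int) 1).foldl
      (fun (st : PySem.Dict String Int × Int) j =>
        (st.1.update [(PySem.List.pyGetD (cats.map Prod.snd) j "",
                       PySem.Int.mod st.2 (PySem.List.pyGetD (cats.map Prod.fst) j 0))],
         PySem.Int.floordiv st.2 (PySem.List.pyGetD (cats.map Prod.fst) j 0)))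
      (d0, i)
      = (d0.update (pvDg cats i), pvFin cats i) := by
  have h1 : ∀ j, PySem.List.pyGetD (cats.map Prod.fst) j 0
      = (PySem.List.pyGetD cats j ((0 : Int), "")).1 :=
    fun j => PySem.List.pyGetD_map Prod.fst cats j ((0 : Int), "")
  have h2 : ∀ j, PySem.List.pyGetD (cats.map Prod.snd) j ""
      = (PySem.List.pyGetD cats j ((0 : Int), "")).2 :=
    fun j => PySem.List.pyGetD_map Prod.snd cats j ((0 : Int), "")
  simp only [h1, h2, List.length_map]
  have := PySem.List.foldl_pyRange_zero_pyGetD' cats ((0 : Int), "")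
    (fun (st : PySem.Dict String Int × Int) (p : Int × String) =>
      (st.1.update [(p.2, PySem.Int.mod st.2 p.1)], PySem.Int.floordiv st.2 p.1)) (d0, i)
  rw [this, pvZipFold]

lemma pvBfold (cs : List (Int × String)) :
    cs.reverse.foldl
      (fun (acc : List (List Int)) (c : Int × String) =>
        acc.flatMap (fun rest => (PySem.List.pyRange 0 c.1 1).map (fun d => d :: rest)))
      [[]] = pvD cs := by
  induction cs with
  | nil => rfl
  | cons c cs ih => simp [List.foldl_append, ih, pvD]

lemma pvRangeSplit (s : Int) (hs : 0 < s) : ∀ (P : Int), 0 ≤ P →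
    PySem.List.pyRange 0 (s * P) 1
      = (PySem.List.pyRange 0 P 1).flatMap
          (fun q => (PySem.List.pyRange 0 s 1).map (fun r => q * s + r)) := by
  intro P hP
  obtain ⟨m, rfl⟩ := Int.eq_ofNat_of_zero_le hP
  induction m with
  | zero => simp [PySem.List.pyRange_one_eq_nil (le_refl (0 : Int))]
  | succ m ih =>
    have hm : (0 : Int) ≤ (m : Int) := Int.natCast_nonneg m
    have hcast : ((m + 1 : Nat) : Int) = (m : Int) + 1 := by push_cast; ring
    rw [hcast, PySem.List.pyRange_one_succ_right hm, List.flatMap_append]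
    have hmul : s * ((m : Int) + 1) = s * (m : Int) + s := by ring
    rw [hmul, PySem.List.pyRange_one_append 0 (s * (m : Int)) (s * (m : Int) + s)
      (by positivity) (by linarith), ih hm]
    congr 1
    · simp only [List.flatMap_cons, List.flatMap_nil, List.append_nil]
      rw [PySem.List.pyRange_one, PySem.List.pyRange_one]
      simp only [List.map_map]
      have harg : (s * (m : Int) + s - s * (m : Int)).toNat = (s - 0).toNat := by
        congr 1; ring
      rw [harg]
      apply List.map_congr_left
      intro k _
      simp only [Function.comp_apply]
      ring
  -- (ih hm): the inner induction hypothesis is stated for ↑m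

lemma pvCore (cs : List (Int × String)) (h : ∀ c ∈ cs, 0 ≤ c.1) :
    (PySem.List.pyRange 0 ((cs.map Prod.fst).prod) 1).map (fun i => pvDv cs i) = pvD cs := by
  induction cs with
  | nil =>
    rw [show ((List.map Prod.fst ([] : List (Int × String))).prod) = 0 + 1 by simp,
      PySem.List.pyRange_one_singleton]
    rfl
  | cons c cs ih =>
    have hs : 0 ≤ c.1 := h c (List.mem_cons_self)
    have hrest : ∀ c' ∈ cs, 0 ≤ c'.1 := fun c' hc' => h c' (List.mem_cons_of_mem _ hc')
    have hP : 0 ≤ (cs.map Prod.fst).prod := List.prod_nonneg (by simpa using hrest)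
    have hprod : ((c :: cs).map Prod.fst).prod = c.1 * (cs.map Prod.fst).prod := by simp
    rcases eq_or_lt_of_le hs with hz | hpos
    · rw [hprod, ← hz]
      simp [pvD, ← hz, PySem.List.pyRange_one_eq_nil (le_refl (0 : Int)),
        List.flatMap_eq_nil_iff]
    · rw [hprod, pvRangeSplit c.1 hpos _ hP, List.map_flatMap]
      rw [pvD, ← ih hrest, List.flatMap_map]
      congr 1
      funext q
      simp only [List.map_map]
      apply List.map_congr_left
      intro r hr
      simp only [Function.comp_apply]
      rw [PySem.List.mem_pyRange_one] at hr
      have hdiv : PySem.Int.floordiv (q * c.1 + r) c.1 = q := by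
        rw [PySem.Int.floordiv_eq_iff_of_pos hpos]
        constructor
        · linarith [hr.1]
        · have : (q + 1) * c.1 = q * c.1 + c.1 := by ring
          rw [this]; linarith [hr.2]
      have hmod : PySem.Int.mod (q * c.1 + r) c.1 = r := by
        have hiden := PySem.Int.floordiv_mul_add_mod (q * c.1 + r) c.1
        rw [hdiv] at hiden; linarith
      simp [pvDv, hdiv, hmod]

lemma pvAltEq (cat1 : String × Int) (cats : List (Int × String))
    (h : ¬ cats.any (fun cat => cat.1 ≤ 0) = true) :
    yield_helper_alt cat1 cats
      = (pvD cats).map (fun ds =>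
          ((PySem.Dict.ofList [(cat1.1, cat1.2)]).update
            (PySem.Dict.ofList ((cats.map Prod.snd).zip ds)).items).items) := by
  unfold yield_helper_alt
  rw [if_neg h, pvBfold]

lemma pvAEq (cat1 : String × Int) (cats : List (Int × String)) :
    yield_helper cat1 cats
      = (PySem.List.pyRange 0 ((cats.map Prod.fst).prod) 1).map (fun i =>
          ((PySem.Dict.ofList [(cat1.1, cat1.2)]).update
            (PySem.Dict.empty.update (pvDg cats i)).items).items) := by
  unfold yield_helper
  rw [pvL0]
  simp only [List.nil_append, one_mul]
  apply List.map_congr_left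
  intro i _
  show ((PySem.Dict.ofList [(cat1.1, cat1.2)]).update
      (((PySem.List.pyRange 0 (((cats.map Prod.fst).length : Nat) : Int) 1).foldl
        (fun (st : PySem.Dict String Int × Int) j =>
          (st.1.update [(PySem.List.pyGetD (cats.map Prod.snd) j "",
                         PySem.Int.mod st.2 (PySem.List.pyGetD (cats.map Prod.fst) j 0))],
           PySem.Int.floordiv st.2 (PySem.List.pyGetD (cats.map Prod.fst) j 0)))
        (PySem.Dict.empty, i)).1).items).items = _
  rw [pvInner]

lemma pvAltNil (cat1 : String × Int) (cats : List (Int × String)) (h : ∃ c ∈ cats, c.1 ≤ 0) :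
    yield_helper_alt cat1 cats = [] := by
  unfold yield_helper_alt
  rw [if_pos (by simpa [List.any_eq_true] using h)]

lemma pvMain (cat1 : String × Int) (cats : List (Int × String)) (h : ∀ c ∈ cats, 0 ≤ c.1) :
    yield_helper cat1 cats = yield_helper_alt cat1 cats := by
  by_cases hz : ∃ c ∈ cats, c.1 ≤ 0
  · -- some size is 0 (all are ≥ 0 here), so the product is 0 and both sides are empty
    obtain ⟨c, hc, hle⟩ := hz
    have hzero : c.1 = 0 := le_antisymm hle (h c hc)
    have hmem : (0 : Int) ∈ cats.map Prod.fst := hzero ▸ List.mem_map_of_mem hc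
    rw [pvAEq, List.prod_eq_zero hmem, PySem.List.pyRange_one_eq_nil (le_refl (0 : Int)),
      pvAltNil cat1 cats ⟨c, hc, hle⟩]
    rfl
  · rw [pvAEq, pvAltEq cat1 cats (by simpa [List.any_eq_true] using hz), ← pvCore cats h,
      List.map_map]
    apply List.map_congr_left
    intro i _
    simp only [Function.comp_apply, ← pvZip cats i]
    rfl

-- ===== VERDICT (by name: the statement is the Claim_ definition above) =====
theorem yield_helper_spec : Claim_unchanged_yield_helper := by
  intro cat1 cats _ hnd
  by_cases hall : ∀ c ∈ cats, 0 ≤ c.1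
  · exact pvMain cat1 cats hall
  · push Not at hall
    obtain ⟨c, hc, hneg⟩ := hall
    have hneg' : c.1 < 0 := hneg
    have hP : (cats.map Prod.fst).prod ≤ 0 :=
      le_of_not_gt (fun hpos => hnd ⟨⟨c, hc, hneg'⟩, hpos⟩)
    rw [pvAEq, PySem.List.pyRange_one_eq_nil hP, pvAltNil cat1 cats ⟨c, hc, le_of_lt hneg'⟩]
    rfl

theorem yield_helper_changed : Claim_changed_yield_helper := by
  unfold Claim_changed_yield_helper; decide

theorem yield_helper_tight : Claim_exact_yield_helper := by
  intro cat1 cats _ hd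
  obtain ⟨hneg, hpos⟩ := hd
  obtain ⟨c, hc, hneg'⟩ := hneg
  rw [pvAEq, pvAltNil cat1 cats ⟨c, hc, le_of_lt hneg'⟩]
  have h0 : (0 : Int) ∈ PySem.List.pyRange 0 ((cats.map Prod.fst).prod) 1 :=
    PySem.List.mem_pyRange_one.mpr ⟨le_refl 0, hpos⟩
  exact List.ne_nil_of_mem (List.mem_map_of_mem h0)
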